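-- pv_equiv track=rewrite | github.com/avk-ho/hacker_rank_algo | medium/gaming_array.py | gaming_array
-- ===== SOURCE A (Python) =====
-- def gaming_array(arr):
--     # Bob is True, Andy is False
--     winning_player = False
--     while len(arr) > 0:
--         max_num = max(arr)
--         max_num_idx = arr.index(max_num)
--
--         arr = arr[:max_num_idx]
--         winning_player = not winning_player
--
--     if winning_player:
--         return "Bob"
--     else:
--         return "Andy"
-- ===== SOURCE B (Python) =====
-- def gaming_array(arr):
--     count = 0
--     best = None
--     for x in arr:
--         if best is None or x > best:
--             best = x
--             count += 1
--     return "Bob" if count % 2 == 1 else "Andy"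
-- ===== Notes on version B (the rewrite author's own statement) =====
-- stated objective: faster
-- what changed: Replaced the repeated max/index/slice while-loop with one left-to-right pass counting strict prefix maxima and deciding the winner by the parity of that count.
import Mathlib
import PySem

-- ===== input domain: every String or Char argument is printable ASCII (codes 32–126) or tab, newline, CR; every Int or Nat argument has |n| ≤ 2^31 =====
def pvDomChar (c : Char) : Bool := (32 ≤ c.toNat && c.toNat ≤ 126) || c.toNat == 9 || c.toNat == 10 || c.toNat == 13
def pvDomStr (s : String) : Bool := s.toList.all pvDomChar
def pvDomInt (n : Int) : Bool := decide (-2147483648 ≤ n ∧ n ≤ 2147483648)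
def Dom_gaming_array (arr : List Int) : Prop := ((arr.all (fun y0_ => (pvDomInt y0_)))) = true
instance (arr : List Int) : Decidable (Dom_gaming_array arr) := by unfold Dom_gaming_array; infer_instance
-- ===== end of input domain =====

-- B replaces A's repeated max/index/slice while-loop by a single pass counting strict
-- prefix maxima and taking the parity of the count (objective: faster, O(n) vs O(n^2)).

-- ===== PORT A =====
-- the while-loop of A: state is (arr, winning_player); each round truncates arr before
-- the first occurrence of its maximum and flips the flag
def gaming_array_loop (arr : List Int) (w : Bool) : Bool :=
  if h : arr.length > 0 then
    match h1 : PySem.List.max? arr (fun x => x) with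
    | none => w  -- unreachable: arr nonempty
    | some m =>
      match h2 : PySem.List.index? arr m with
      | none => w  -- unreachable: m ∈ arr
      | some idx =>
        gaming_array_loop (PySem.List.slice arr none (some (idx : Int))) (!w)
  else w
termination_by arr.length
decreasing_by
  obtain ⟨hk, _, _⟩ := PySem.List.getElem_of_index?_eq_some h2
  rw [PySem.List.slice_to_natCast]
  simp only [List.length_take]
  omega

def gaming_array (arr : List Int) : String :=
  if gaming_array_loop arr false then "Bob" else "Andy"

-- ===== PORT B =====
def gaming_array_alt (arr : List Int) : String :=
  let p := arr.foldl
    (fun (s : Option Int × Nat) x =>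
      match s.1 with
      | none => (some x, s.2 + 1)
      | some b => if b < x then (some x, s.2 + 1) else s)
    (none, 0)
  if p.2 % 2 == 1 then "Bob" else "Andy"

-- ===== PRECONDITION & SPEC =====
def Spec_gaming_array (arr : List Int) (out : String) : Prop := out = gaming_array_alt arr
instance (arr : List Int) (out : String) : Decidable (Spec_gaming_array arr out) := by unfold Spec_gaming_array; infer_instance

-- ===== CLAIM (what is proved, stated in full; the proofs are below) =====
def Claim_equal_gaming_array : Prop := ∀ (arr : List Int), Dom_gaming_array arr → Spec_gaming_array arr (gaming_array arr)

-- ===== LEMMAS AND PROOFS =====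

-- count of strict left-to-right maxima of xs, given running best b (none = no element yet)
def cntAux : Option Int → List Int → Nat
  | _, [] => 0
  | none, x :: xs => 1 + cntAux (some x) xs
  | some b, x :: xs => if b < x then 1 + cntAux (some x) xs else cntAux (some b) xs

lemma foldl_eq_cntAux (xs : List Int) : ∀ (b : Option Int) (c : Nat),
    (xs.foldl
      (fun (s : Option Int × Nat) x =>
        match s.1 with
        | none => (some x, s.2 + 1)
        | some b => if b < x then (some x, s.2 + 1) else s)
      (b, c)).2 = c + cntAux b xs := by
  induction xs with
  | nil => intro b c; simp [cntAux]
  | cons x xs ih =>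
    intro b c
    cases b with
    | none => simp [List.foldl_cons, cntAux, ih]; omega
    | some b0 =>
      by_cases hb : b0 < x
      · simp [List.foldl_cons, cntAux, hb, ih]; omega
      · simp [List.foldl_cons, cntAux, hb, ih]

lemma cntAux_top (xs : List Int) (m : Int) (h : ∀ x ∈ xs, x ≤ m) :
    cntAux (some m) xs = 0 := by
  induction xs with
  | nil => rfl
  | cons x xs ih =>
    have hx : ¬ m < x := not_lt.mpr (h x (List.mem_cons_self))
    simp only [cntAux, if_neg hx]
    exact ih (fun y hy => h y (List.mem_cons_of_mem _ hy))

lemma cntAux_split (pre : List Int) : ∀ (post : List Int) (m : Int) (b : Option Int),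
    (∀ x ∈ pre, x < m) → (∀ x ∈ post, x ≤ m) →
    (b = none ∨ ∃ b0, b = some b0 ∧ b0 < m) →
    cntAux b (pre ++ m :: post) = cntAux b pre + 1 := by
  induction pre with
  | nil =>
    intro post m b _ hpost hb
    rcases hb with rfl | ⟨b0, rfl, hb0⟩
    · simp [cntAux, cntAux_top post m hpost]
    · simp [cntAux, hb0, cntAux_top post m hpost]
  | cons x pre ih =>
    intro post m b hpre hpost hb
    have hx : x < m := hpre x (List.mem_cons_self)
    have hpre' : ∀ y ∈ pre, y < m := fun y hy => hpre y (List.mem_cons_of_mem _ hy)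
    rcases hb with rfl | ⟨b0, rfl, hb0⟩
    · simp only [List.cons_append, cntAux]
      rw [ih post m (some x) hpre' hpost (Or.inr ⟨x, rfl, hx⟩)]
      omega
    · by_cases hbx : b0 < x
      · simp only [List.cons_append, cntAux, if_pos hbx]
        rw [ih post m (some x) hpre' hpost (Or.inr ⟨x, rfl, hx⟩)]
        omega
      · simp only [List.cons_append, cntAux, if_neg hbx]
        exact ih post m (some b0) hpre' hpost (Or.inr ⟨b0, rfl, hb0⟩)

lemma loop_eq_parity : ∀ (n : Nat) (arr : List Int) (w : Bool), arr.length ≤ n →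
    gaming_array_loop arr w = xor w (decide (cntAux none arr % 2 = 1)) := by
  intro n
  induction n with
  | zero =>
    intro arr w h
    have : arr = [] := List.length_eq_zero_iff.mp (Nat.le_zero.mp h)
    subst this
    simp [gaming_array_loop, cntAux]
  | succ n ih =>
    intro arr w h
    rcases arr with _ | ⟨a, t⟩
    · simp [gaming_array_loop, cntAux]
    · set arr := a :: t with harr
      have hne : arr ≠ [] := by simp [harr]
      have hlen : arr.length > 0 := by simp [harr]
      -- max? is some m
      obtain ⟨m, hm⟩ : ∃ m, PySem.List.max? arr (fun x => x) = some m := by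
        cases hmx : PySem.List.max? arr (fun x => x) with
        | none => exact absurd ((PySem.List.max?_eq_none_iff arr (fun x => x)).mp hmx) hne
        | some m => exact ⟨m, rfl⟩
      have hmem : m ∈ arr := PySem.List.max?_mem hm
      have hmax : ∀ y ∈ arr, y ≤ m := by
        intro y hy; exact PySem.List.max?_isMax hm y hy
      obtain ⟨idx, hidx⟩ : ∃ k, PySem.List.index? arr m = some k := by
        cases hix : PySem.List.index? arr m with
        | none => exact absurd ((PySem.List.index?_eq_none_iff arr m).mp hix) (by simp [hmem])
        | some k => exact ⟨k, rfl⟩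
      obtain ⟨pre, suf, hdecomp, hprelen, hnotin⟩ := (PySem.List.index?_eq_some_iff arr m idx).mp hidx
      -- unfold one step of the loop
      rw [gaming_array_loop]
      simp only [hlen, dif_pos]
      split
      case _ heq => rw [hm] at heq; exact absurd heq (by simp)
      case _ m' hm' =>
      have hm'' : m = m' := by rw [hm] at hm'; exact Option.some.inj hm'
      subst hm''
      split
      case _ heq => rw [hidx] at heq; exact absurd heq (by simp)
      case _ idx' hidx' =>
      have hidx'' : idx = idx' := by rw [hidx] at hidx'; exact Option.some.inj hidx'
      subst hidx''
      have hslice : PySem.List.slice arr none (some (idx : Int)) = pre := by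
        rw [PySem.List.slice_to_natCast, hdecomp, ← hprelen]
        simp
      rw [hslice]
      have hprelt : ∀ x ∈ pre, x < m := by
        intro x hx
        have hle : x ≤ m := hmax x (by rw [hdecomp]; exact List.mem_append_left _ hx)
        have hne' : x ≠ m := fun he => hnotin (he ▸ hx)
        exact lt_of_le_of_ne hle hne'
      have hsufle : ∀ x ∈ suf, x ≤ m := by
        intro x hx
        exact hmax x (by rw [hdecomp]; exact List.mem_append_right _ (List.mem_cons_of_mem _ hx))
      have hcnt : cntAux none arr = cntAux none pre + 1 := by
        rw [hdecomp]; exact cntAux_split pre suf m none hprelt hsufle (Or.inl rfl)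
      have hlt : pre.length ≤ n := by
        have : pre.length < arr.length := by
          rw [hdecomp]; simp
        omega
      rw [ih pre (!w) hlt, hcnt]
      by_cases hp : cntAux none pre % 2 = 1
      · have : (cntAux none pre + 1) % 2 = 0 := by omega
        simp [hp, this]
      · have : (cntAux none pre + 1) % 2 = 1 := by omega
        simp [hp, this]

-- ===== VERDICT (by name: the statement is the Claim_ definition above) =====
theorem gaming_array_spec : Claim_equal_gaming_array := by
  intro arr _
  unfold Spec_gaming_array gaming_array gaming_array_alt
  rw [loop_eq_parity arr.length arr false le_rfl]
  simp only [foldl_eq_cntAux, Nat.zero_add, Bool.false_xor]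
  by_cases hp : cntAux none arr % 2 = 1 <;> simp [hp]
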